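-- pv_equiv track=rewrite | github.com/RaxitGamdha-R52G/Grep | main.py | _count_capture_groups
-- ===== SOURCE A (Python) =====
-- def _count_capture_groups(pattern: str) -> int:
--     """Counts the number of capturing groups '(' in the pattern, ignoring escaped ones."""
--     count = 0
--     i = 0
--     while i < len(pattern):
--         # We must ignore escaped parentheses like '\('.
--         if pattern[i] == '\\':
--             i += 2 # Skip the backslash and the character after it.
--         elif pattern[i] == '(':
--             count += 1
--             i += 1
--         else:
--             i += 1
--     return count
-- ===== SOURCE B (Python) =====
-- def _count_capture_groups(pattern: str) -> int:
--     """Staged: split on backslashes, then count '(' per piece.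
--
--     Each piece after a backslash starts with an escaped character, so its first
--     character is skipped; an empty piece means the backslash escaped another
--     backslash, so the following piece (if any) is counted in full.
--     """
--     pieces = iter(pattern.split('\\'))
--     count = next(pieces).count('(')
--     for piece in pieces:
--         if piece:
--             count += piece[1:].count('(')
--         else:
--             count += next(pieces, '').count('(')
--     return count
-- ===== Notes on version B (the rewrite author's own statement) =====
-- stated objective: faster
-- what changed: Replaces A's index-jumping per-character scan with a staged algorithm: split the pattern on backslashes, then count '(' per piece, skipping each piece's escaped first character (an empty piece means an escaped backslash, so the following piece is counted in full); the per-character work moves into C-implemented str.split/str.count.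
import Mathlib
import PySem

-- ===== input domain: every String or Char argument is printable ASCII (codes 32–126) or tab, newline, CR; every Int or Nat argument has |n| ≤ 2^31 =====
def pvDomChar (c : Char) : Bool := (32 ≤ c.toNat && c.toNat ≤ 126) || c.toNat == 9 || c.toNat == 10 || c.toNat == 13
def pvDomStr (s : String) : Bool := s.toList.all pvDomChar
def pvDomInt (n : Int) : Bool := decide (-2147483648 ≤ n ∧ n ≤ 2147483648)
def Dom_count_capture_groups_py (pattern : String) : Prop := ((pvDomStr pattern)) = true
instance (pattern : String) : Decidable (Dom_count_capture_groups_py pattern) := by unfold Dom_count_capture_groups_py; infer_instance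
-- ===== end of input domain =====

-- B replaces A's index-jumping character loop by a staged algorithm: split the pattern on
-- backslashes, then count '(' per piece (skipping each piece's escaped first character);
-- objective: faster by a constant factor (the per-character work moves into C-level str.split/str.count).


-- ===== PORT A =====
-- A's while loop over index i: on '\\' jump i by 2 (skip the escaped char), on '(' count and
-- step, else step.  Transcribed as structural recursion on the character list, where the
-- i += 2 jump is the pattern '\\' :: _ :: rest.
def countA_loop : List Char → Int
  | [] => 0
  | '\\' :: rest =>
      match rest with
      | [] => 0                      -- i += 2 runs past the end: loop exits
      | _ :: rest' => countA_loop rest'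
  | '(' :: rest => 1 + countA_loop rest
  | _ :: rest => countA_loop rest

def count_capture_groups_py (pattern : String) : Int :=
  countA_loop pattern.toList

-- ===== PORT B =====
-- Source B's pattern.split('\\'): Python str.split with a one-character separator, transcribed
-- by hand (exact for a single-char separator: pieces between backslashes, empties kept).
def splitBS : List Char → List (List Char)
  | [] => [[]]
  | '\\' :: rest => [] :: splitBS rest
  | c :: rest =>
      match splitBS rest with
      | [] => [[c]]                  -- unreachable: splitBS never returns []
      | h :: t => (c :: h) :: t

-- Source B's for-loop over the remaining pieces: nonempty piece → count '(' in piece[1:];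
-- empty piece → the backslash escaped a backslash, count the next piece in full.
def countB_go : List (List Char) → Int
  | [] => 0
  | p :: ps =>
      if p ≠ [] then (p.tail.count '(' : Int) + countB_go ps
      else
        match ps with
        | [] => 0                    -- next(pieces, '') = '' contributes 0, loop ends
        | q :: ps' => (q.count '(' : Int) + countB_go ps'

def count_capture_groups_py_alt (pattern : String) : Int :=
  match splitBS pattern.toList with
  | [] => 0                          -- unreachable: split of a string is never empty
  | p0 :: ps => (p0.count '(' : Int) + countB_go ps

-- ===== PRECONDITION & SPEC =====
def Spec_count_capture_groups_py (pattern : String) (out : Int) : Prop := out = count_capture_groups_py_alt pattern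
instance (pattern : String) (out : Int) : Decidable (Spec_count_capture_groups_py pattern out) := by unfold Spec_count_capture_groups_py; infer_instance

-- ===== CLAIM (what is proved, stated in full; the proofs are below) =====
def Claim_equal_count_capture_groups_py : Prop := ∀ (pattern : String), Dom_count_capture_groups_py pattern → Spec_count_capture_groups_py pattern (count_capture_groups_py pattern)

-- ===== LEMMAS AND PROOFS =====

-- B's whole computation on a piece list, as a function (first piece in full, rest via countB_go).
def countB_all (ls : List (List Char)) : Int :=
  match ls with
  | [] => 0
  | p0 :: ps => (p0.count '(' : Int) + countB_go ps

theorem splitBS_ne_nil (l : List Char) : splitBS l ≠ [] := by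
  induction l using splitBS.induct with
  | case1 => simp [splitBS]
  | case2 rest ih => simp [splitBS]
  | case3 c rest hc h ih => simp [h] at ih ⊢
  | case4 c rest hc h t hsplit ih => simp [splitBS, hsplit]

theorem splitBS_cons (c : Char) (rest : List Char) (hc : c ≠ '\\') (h : List Char)
    (t : List (List Char)) (hsplit : splitBS rest = h :: t) :
    splitBS (c :: rest) = (c :: h) :: t := by
  rw [splitBS.eq_def]
  split
  · rename_i heq; cases heq
  · rename_i heq; injection heq with h1 h2; exact absurd h1 hc
  · rename_i hne heq; injection heq with h1 h2; subst h1; subst h2; rw [hsplit]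

theorem countA_other (c : Char) (rest : List Char) (h1 : c ≠ '\\') (h2 : c ≠ '(') :
    countA_loop (c :: rest) = countA_loop rest := by
  rw [countA_loop.eq_def]
  split
  · rename_i heq; cases heq
  · rename_i heq; injection heq with ha hb; exact absurd ha h1
  · rename_i heq; injection heq with ha hb; exact absurd ha h2
  · rename_i heq; injection heq with ha hb; rw [hb]

theorem countB_go_cons (c : Char) (h : List Char) (t : List (List Char)) :
    countB_go ((c :: h) :: t) = (h.count '(' : Int) + countB_go t := by
  rw [countB_go.eq_def]; simp

theorem countB_go_nil_cons (ps : List (List Char)) :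
    countB_go ([] :: ps) = countB_all ps := by
  cases ps with
  | nil => rw [countB_go.eq_def]; simp [countB_all]
  | cons q ps' => rw [countB_go.eq_def]; simp [countB_all]

-- After consuming one (escaped) leading character of c :: rest, B's remaining-piece loop
-- computes exactly B's whole computation on the split of rest.
theorem countB_go_split_cons (c : Char) (rest : List Char) :
    countB_go (splitBS (c :: rest)) = countB_all (splitBS rest) := by
  by_cases hc : c = '\\'
  · subst hc
    rw [show splitBS ('\\' :: rest) = [] :: splitBS rest from rfl]
    exact countB_go_nil_cons _
  · obtain ⟨h, t, hsplit⟩ := List.exists_cons_of_ne_nil (splitBS_ne_nil rest)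
    rw [splitBS_cons c rest hc h t hsplit, countB_go_cons]
    simp [countB_all, hsplit]

theorem countA_eq_countB_all (l : List Char) :
    countA_loop l = countB_all (splitBS l) := by
  induction l using countA_loop.induct with
  | case1 => simp [countA_loop, splitBS, countB_all, countB_go]
  | case2 => simp [countA_loop, splitBS, countB_all, countB_go]
  | case3 c rest' ih =>
      calc countA_loop ('\\' :: c :: rest') = countA_loop rest' := rfl
        _ = countB_all (splitBS rest') := ih
        _ = countB_go (splitBS (c :: rest')) := (countB_go_split_cons c rest').symm
        _ = countB_all ([] :: splitBS (c :: rest')) := by simp [countB_all]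
        _ = countB_all (splitBS ('\\' :: c :: rest')) := rfl
  | case4 rest ih =>
      obtain ⟨h, t, hsplit⟩ := List.exists_cons_of_ne_nil (splitBS_ne_nil rest)
      calc countA_loop ('(' :: rest) = 1 + countA_loop rest := rfl
        _ = 1 + countB_all (splitBS rest) := by rw [ih]
        _ = countB_all (splitBS ('(' :: rest)) := by
              rw [splitBS_cons '(' rest (by decide) h t hsplit]
              simp [countB_all, hsplit]
              ring
  | case5 c rest h1 h2 ih =>
      obtain ⟨h, t, hsplit⟩ := List.exists_cons_of_ne_nil (splitBS_ne_nil rest)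
      have h2' : ¬ c = '(' := fun e => h2 e
      calc countA_loop (c :: rest) = countA_loop rest :=
              countA_other c rest (fun e => h1 e) h2'
        _ = countB_all (splitBS rest) := ih
        _ = countB_all (splitBS (c :: rest)) := by
              rw [splitBS_cons c rest (fun e => h1 e) h t hsplit]
              simp [countB_all, hsplit, h2']

-- ===== VERDICT (by name: the statement is the Claim_ definition above) =====
theorem count_capture_groups_py_spec : Claim_equal_count_capture_groups_py := by
  intro pattern _
  exact countA_eq_countB_all pattern.toList
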